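-- pv_equiv track=rewrite | github.com/sepandhaghighi/pycm | pycm/utils.py | matrix_combine
-- ===== SOURCE A (Python) =====
-- from typing import Union, List, Dict, Any, Tuple, Callable, Optional
--
-- def matrix_combine(matrix_1: Dict[Any, Dict[Any, int]],
--                    matrix_2: Dict[Any, Dict[Any, int]]) -> Dict[Any, Dict[Any, int]]:
--     """
--     Return the combination of two confusion matrices.
--
--     :param matrix_1: first matrix that is going to be combined.
--     :param matrix_2: second matrix that is going to be combined.
--     """
--     result_matrix: Dict[Any, Dict[Any, int]] = {}
--     classes_1, classes_2 = matrix_1.keys(), matrix_2.keys()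
--     classes = set(classes_1).union(set(classes_2))
--     for class_1 in classes:
--         temp_dict: Dict[Any, int] = {}
--         for class_2 in classes:
--             tmp = 0
--             if class_1 in classes_1 and class_2 in classes_1:
--                 tmp += matrix_1[class_1][class_2]
--             if class_1 in classes_2 and class_2 in classes_2:
--                 tmp += matrix_2[class_1][class_2]
--             temp_dict[class_2] = tmp
--         result_matrix[class_1] = temp_dict
--     return result_matrix
-- ===== SOURCE B (Python) =====
-- def matrix_combine(matrix_1, matrix_2):
--     """Scatter version: zero-initialize the full union x union grid, then
--     accumulate each source matrix's entries into it (two passes)."""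
--     classes = set(matrix_1).union(set(matrix_2))
--     result = {c1: {c2: 0 for c2 in classes} for c1 in classes}
--     for source in (matrix_1, matrix_2):
--         for c1, row in source.items():
--             target = result[c1]
--             for c2 in source:
--                 target[c2] += row[c2]
--     return result
-- ===== Notes on version B (the rewrite author's own statement) =====
-- stated objective: alternative
-- what changed: A gathers each output cell with per-cell membership tests over the union of classes; B pre-zeroes the full union-by-union grid and scatters each source matrix's entries into it in two accumulation passes, with no membership checks.
import Mathlib
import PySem

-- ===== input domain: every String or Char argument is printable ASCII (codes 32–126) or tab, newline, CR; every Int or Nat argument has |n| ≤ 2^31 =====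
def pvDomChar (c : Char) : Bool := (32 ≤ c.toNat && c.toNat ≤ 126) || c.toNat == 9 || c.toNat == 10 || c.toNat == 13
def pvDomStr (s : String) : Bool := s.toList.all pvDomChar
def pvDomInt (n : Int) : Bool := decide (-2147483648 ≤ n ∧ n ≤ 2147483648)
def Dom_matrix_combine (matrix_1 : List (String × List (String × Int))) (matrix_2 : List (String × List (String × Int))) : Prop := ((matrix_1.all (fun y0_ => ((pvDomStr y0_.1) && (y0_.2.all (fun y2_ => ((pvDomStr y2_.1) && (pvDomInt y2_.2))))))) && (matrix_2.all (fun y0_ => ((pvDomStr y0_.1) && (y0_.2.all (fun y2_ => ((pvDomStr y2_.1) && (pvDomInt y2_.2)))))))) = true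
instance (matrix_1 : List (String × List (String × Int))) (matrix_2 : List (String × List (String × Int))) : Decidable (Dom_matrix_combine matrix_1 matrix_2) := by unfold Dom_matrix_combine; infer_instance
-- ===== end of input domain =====

-- B replaces A's per-cell gather (membership tests over the union of classes for every
-- output cell) by a pre-zeroed union-grid into which each source matrix's entries are
-- scattered in two accumulation passes (alternative decomposition, same asymptotic cost).


-- ===== PORT A =====
-- matrix[c1][c2]: two raising dict lookups; ported with getD, exact under Pre_ (which
-- guarantees both keys are present wherever this expression is evaluated).
def pvGet2 (m : List (String × List (String × Int))) (c1 c2 : String) : Int :=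
  PySem.Dict.getD (PySem.Dict.mk (PySem.Dict.getD (PySem.Dict.mk m) c1 [])) c2 0

def matrix_combine (matrix_1 : List (String × List (String × Int))) (matrix_2 : List (String × List (String × Int))) : List (String × List (String × Int)) :=
  let classes_1 := matrix_1.map Prod.fst
  let classes_2 := matrix_2.map Prod.fst
  let classes : PySem.Set String := PySem.Set.union (PySem.Set.ofList classes_1) (PySem.Set.ofList classes_2)
  let result_matrix := classes.foldl (fun result_matrix class_1 =>
    let temp_dict := classes.foldl (fun temp_dict class_2 =>
      let tmp : Int := 0
      let tmp := tmp + (if class_1 ∈ classes_1 ∧ class_2 ∈ classes_1 then pvGet2 matrix_1 class_1 class_2 else 0)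
      let tmp := tmp + (if class_1 ∈ classes_2 ∧ class_2 ∈ classes_2 then pvGet2 matrix_2 class_1 class_2 else 0)
      PySem.Dict.insert temp_dict class_2 tmp) PySem.Dict.empty
    PySem.Dict.insert result_matrix class_1 temp_dict.items) PySem.Dict.empty
  result_matrix.items

-- ===== PORT B =====
-- one source pass: for c1, row in source.items(): for c2 in source: result[c1][c2] += row[c2]
def pvScatter (res : PySem.Dict String (PySem.Dict String Int)) (source : List (String × List (String × Int))) : PySem.Dict String (PySem.Dict String Int) :=
  source.foldl (fun res p =>
    res.modify p.1 PySem.Dict.empty (fun target =>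
      (source.map Prod.fst).foldl (fun target c2 =>
        target.modify c2 0 (fun v => v + PySem.Dict.getD (PySem.Dict.mk p.2) c2 0)) target)) res

def matrix_combine_alt (matrix_1 : List (String × List (String × Int))) (matrix_2 : List (String × List (String × Int))) : List (String × List (String × Int)) :=
  let classes : PySem.Set String := PySem.Set.union (PySem.Set.ofList (matrix_1.map Prod.fst)) (PySem.Set.ofList (matrix_2.map Prod.fst))
  let zeroRow : PySem.Dict String Int := classes.foldl (fun d c2 => d.insert c2 0) PySem.Dict.empty
  let result := classes.foldl (fun r c1 => r.insert c1 zeroRow) PySem.Dict.empty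
  let result := pvScatter (pvScatter result matrix_1) matrix_2
  result.items.map (fun p => (p.1, p.2.items))

-- ===== PRECONDITION & SPEC =====
-- Pre_ excludes (i) association lists with duplicate keys at either level, which do not
-- denote Python dict inputs (dict construction collapses duplicates), and (ii) matrices in
-- which some row lacks one of its own matrix's top-level classes, where A raises KeyError.
def Pre_matrix_combine (matrix_1 : List (String × List (String × Int))) (matrix_2 : List (String × List (String × Int))) : Prop :=
  (matrix_1.map Prod.fst).Nodup ∧ (matrix_2.map Prod.fst).Nodup ∧
  (∀ p ∈ matrix_1, (p.2.map Prod.fst).Nodup ∧ ∀ q ∈ matrix_1, q.1 ∈ p.2.map Prod.fst) ∧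
  (∀ p ∈ matrix_2, (p.2.map Prod.fst).Nodup ∧ ∀ q ∈ matrix_2, q.1 ∈ p.2.map Prod.fst)
instance (matrix_1 : List (String × List (String × Int))) (matrix_2 : List (String × List (String × Int))) : Decidable (Pre_matrix_combine matrix_1 matrix_2) := by unfold Pre_matrix_combine; infer_instance

def pvWitness_matrix_combine : (List (String × List (String × Int))) × (List (String × List (String × Int))) :=
  ([("a", [("a", 1), ("b", 2)]), ("b", [("a", 3), ("b", 4)])], [("a", [("a", 10)])])

def Spec_matrix_combine (matrix_1 : List (String × List (String × Int))) (matrix_2 : List (String × List (String × Int))) (out : List (String × List (String × Int))) : Prop := out = matrix_combine_alt matrix_1 matrix_2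
instance (matrix_1 : List (String × List (String × Int))) (matrix_2 : List (String × List (String × Int))) (out : List (String × List (String × Int))) : Decidable (Spec_matrix_combine matrix_1 matrix_2 out) := by unfold Spec_matrix_combine; infer_instance

-- ===== CLAIM (what is proved, stated in full; the proofs are below) =====
def Claim_equal_matrix_combine : Prop := ∀ (matrix_1 : List (String × List (String × Int))) (matrix_2 : List (String × List (String × Int))), Dom_matrix_combine matrix_1 matrix_2 → Pre_matrix_combine matrix_1 matrix_2 → Spec_matrix_combine matrix_1 matrix_2 (matrix_combine matrix_1 matrix_2)

-- ===== LEMMAS AND PROOFS =====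

-- the union of the two matrices' class lists, and the per-cell value both programs compute
def pvClasses (m1 m2 : List (String × List (String × Int))) : PySem.Set String :=
  PySem.Set.union (PySem.Set.ofList (m1.map Prod.fst)) (PySem.Set.ofList (m2.map Prod.fst))

def pvCell (m1 m2 : List (String × List (String × Int))) (c1 c2 : String) : Int :=
  0 + (if c1 ∈ m1.map Prod.fst ∧ c2 ∈ m1.map Prod.fst then pvGet2 m1 c1 c2 else 0)
    + (if c1 ∈ m2.map Prod.fst ∧ c2 ∈ m2.map Prod.fst then pvGet2 m2 c1 c2 else 0)

theorem pvFoldlModifyNotMem {ν ρ : Type} (key : ρ → String) (F : ρ → ν → ν) (d0 : ν)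
    (l : List ρ) (res : PySem.Dict String ν) (c : String) (h : c ∉ l.map key) :
    (l.foldl (fun res p => res.modify (key p) d0 (F p)) res).getD c d0 = res.getD c d0 := by
  induction l generalizing res with
  | nil => rfl
  | cons p rest ih =>
    simp only [List.map_cons, List.mem_cons, not_or] at h
    simp only [List.foldl_cons]
    rw [ih _ h.2, PySem.Dict.getD_modify_of_ne _ _ _ h.1]

theorem pvFoldlModifyFirst {ν : Type} (F : (String × List (String × Int)) → ν → ν) (d0 : ν)
    (l : List (String × List (String × Int))) (res : PySem.Dict String ν) (c : String)
    (r : List (String × Int)) (hnd : (l.map Prod.fst).Nodup)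
    (h : (PySem.Dict.mk l).get? c = some r) :
    (l.foldl (fun res p => res.modify p.1 d0 (F p)) res).getD c d0 = F (c, r) (res.getD c d0) := by
  induction l generalizing res with
  | nil => simp [PySem.Dict.get?] at h
  | cons p rest ih =>
    obtain ⟨k, v⟩ := p
    rw [PySem.Dict.get?_mk_cons] at h
    simp only [List.map_cons, List.nodup_cons] at hnd
    by_cases hk : k = c
    · subst hk
      simp only [beq_self_eq_true, if_pos] at h
      cases h
      simp only [List.foldl_cons]
      rw [pvFoldlModifyNotMem Prod.fst F d0 rest _ k hnd.1, PySem.Dict.getD_modify_self]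
    · rw [if_neg (by simpa using hk)] at h
      simp only [List.foldl_cons]
      rw [ih _ hnd.2 h, PySem.Dict.getD_modify_of_ne _ _ _ (Ne.symm hk)]

theorem pvFoldlModifyKeysNotMem {ν : Type} (g : String → ν → ν) (d0 : ν)
    (ks : List String) (t : PySem.Dict String ν) (c : String) (h : c ∉ ks) :
    (ks.foldl (fun t c2 => t.modify c2 d0 (g c2)) t).getD c d0 = t.getD c d0 := by
  induction ks generalizing t with
  | nil => rfl
  | cons a rest ih =>
    simp only [List.mem_cons, not_or] at h
    simp only [List.foldl_cons]
    rw [ih _ h.2, PySem.Dict.getD_modify_of_ne _ _ _ h.1]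

theorem pvFoldlModifyKeys {ν : Type} (g : String → ν → ν) (d0 : ν)
    (ks : List String) (t : PySem.Dict String ν) (c : String) (hnd : ks.Nodup) :
    (ks.foldl (fun t c2 => t.modify c2 d0 (g c2)) t).getD c d0 =
      if c ∈ ks then g c (t.getD c d0) else t.getD c d0 := by
  induction ks generalizing t with
  | nil => simp
  | cons a rest ih =>
    simp only [List.nodup_cons] at hnd
    simp only [List.foldl_cons]
    by_cases hk : a = c
    · subst hk
      rw [pvFoldlModifyKeysNotMem g d0 rest _ a hnd.1, PySem.Dict.getD_modify_self]
      simp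
    · rw [ih _ hnd.2, PySem.Dict.getD_modify_of_ne _ _ _ (Ne.symm hk)]
      by_cases hc : c ∈ rest <;> simp [hc, Ne.symm hk]

theorem pvMemKeysIffGet {ν : Type} (l : List (String × ν)) (c : String) :
    c ∈ l.map Prod.fst ↔ ∃ r, (PySem.Dict.mk l).get? c = some r := by
  rw [show l.map Prod.fst = (PySem.Dict.mk l).keys from (PySem.Dict.keys_mk l).symm,
      ← PySem.Dict.contains_iff_mem_keys, PySem.Dict.contains_eq_isSome_get?]
  cases h : (PySem.Dict.mk l).get? c <;> simp

theorem pvUpdateSelf (s : PySem.Set String) (xs : List String) (h : ∀ x ∈ xs, x ∈ s) :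
    PySem.Set.update s xs = s := by
  rw [PySem.Set.update_eq_append_filter]
  have hf : (PySem.Set.ofList xs).filter (fun y => !PySem.Set.contains s y) = [] := by
    apply List.filter_eq_nil_iff.mpr
    intro y hy
    have hys : y ∈ s := h y ((PySem.Set.mem_ofList _ _).mp hy)
    simpa using hys
  rw [hf, List.append_nil]

theorem pvFreshItems {ν : Type} (s : PySem.Set String) (v : String → ν) (hnd : s.Nodup) :
    (s.foldl (fun d a => d.insert a (v a)) PySem.Dict.empty).items = s.map (fun a => (a, v a)) := by
  have h := PySem.Dict.items_foldl_insert_fresh s (fun a => a) v PySem.Dict.empty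
    (by intro a _; simp [PySem.Dict.contains_empty]) (by simpa using hnd)
  simpa [PySem.Dict.empty] using h

theorem pvFreshKeys {ν : Type} (s : PySem.Set String) (v : String → ν) (hnd : s.Nodup) :
    (s.foldl (fun d a => d.insert a (v a)) PySem.Dict.empty).keys = s := by
  simp only [PySem.Dict.keys, pvFreshItems s v hnd]
  simp [Function.comp_def]

theorem pvFreshGetD {ν : Type} (s : PySem.Set String) (v : String → ν) (d0 : ν) (hnd : s.Nodup)
    (c : String) (hc : c ∈ s) :
    (s.foldl (fun d a => d.insert a (v a)) PySem.Dict.empty).getD c d0 = v c := by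
  apply PySem.Dict.getD_of_mem_items
  · rw [pvFreshItems s v hnd]
    exact List.mem_map.mpr ⟨c, hc, rfl⟩
  · rw [pvFreshKeys s v hnd]; exact hnd

-- effect of one scatter pass on one cell
theorem pvScatterCell (d : PySem.Dict String (PySem.Dict String Int))
    (m : List (String × List (String × Int))) (hnd : (m.map Prod.fst).Nodup) (c1 c2 : String) :
    ((pvScatter d m).getD c1 PySem.Dict.empty).getD c2 0 =
      (d.getD c1 PySem.Dict.empty).getD c2 0 +
        (if c1 ∈ m.map Prod.fst ∧ c2 ∈ m.map Prod.fst then pvGet2 m c1 c2 else 0) := by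
  unfold pvScatter
  by_cases hc1 : c1 ∈ m.map Prod.fst
  · obtain ⟨r, hr⟩ := (pvMemKeysIffGet m c1).mp hc1
    rw [pvFoldlModifyFirst
      (fun p target => (m.map Prod.fst).foldl (fun target c2 =>
        target.modify c2 0 (fun v => v + PySem.Dict.getD (PySem.Dict.mk p.2) c2 0)) target)
      PySem.Dict.empty m d c1 r hnd hr]
    rw [pvFoldlModifyKeys (fun c2 v => v + PySem.Dict.getD (PySem.Dict.mk r) c2 0) 0
      (m.map Prod.fst) _ c2 hnd]
    by_cases hc2 : c2 ∈ m.map Prod.fst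
    · have hget : pvGet2 m c1 c2 = PySem.Dict.getD (PySem.Dict.mk r) c2 0 := by
        unfold pvGet2
        rw [PySem.Dict.getD_of_get?_eq_some _ _ hr]
      simp [hc1, hc2, hget]
    · simp [hc2]
  · rw [pvFoldlModifyNotMem Prod.fst
      (fun p target => (m.map Prod.fst).foldl (fun target c2 =>
        target.modify c2 0 (fun v => v + PySem.Dict.getD (PySem.Dict.mk p.2) c2 0)) target)
      PySem.Dict.empty m d c1 hc1]
    simp [hc1]

-- one scatter pass keeps the key set of a row (its classes are already present)
theorem pvScatterRowKeys (d : PySem.Dict String (PySem.Dict String Int))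
    (m : List (String × List (String × Int))) (hnd : (m.map Prod.fst).Nodup)
    (c1 : String) (s : PySem.Set String)
    (hs : (d.getD c1 PySem.Dict.empty).keys = s) (hsub : ∀ k ∈ m.map Prod.fst, k ∈ s) :
    ((pvScatter d m).getD c1 PySem.Dict.empty).keys = s := by
  unfold pvScatter
  by_cases hc1 : c1 ∈ m.map Prod.fst
  · obtain ⟨r, hr⟩ := (pvMemKeysIffGet m c1).mp hc1
    rw [pvFoldlModifyFirst
      (fun p target => (m.map Prod.fst).foldl (fun target c2 =>
        target.modify c2 0 (fun v => v + PySem.Dict.getD (PySem.Dict.mk p.2) c2 0)) target)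
      PySem.Dict.empty m d c1 r hnd hr]
    rw [PySem.Dict.keys_foldl_modify (m.map Prod.fst) 0
      (fun _ c2 => (fun v => v + PySem.Dict.getD (PySem.Dict.mk r) c2 0)) _]
    rw [hs, pvUpdateSelf s _ hsub]
  · rw [pvFoldlModifyNotMem Prod.fst
      (fun p target => (m.map Prod.fst).foldl (fun target c2 =>
        target.modify c2 0 (fun v => v + PySem.Dict.getD (PySem.Dict.mk p.2) c2 0)) target)
      PySem.Dict.empty m d c1 hc1]
    exact hs

-- one scatter pass keeps the outer key set (its classes are already present)
theorem pvScatterKeys (d : PySem.Dict String (PySem.Dict String Int))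
    (m : List (String × List (String × Int))) (s : PySem.Set String)
    (hs : d.keys = s) (hsub : ∀ k ∈ m.map Prod.fst, k ∈ s) :
    (pvScatter d m).keys = s := by
  unfold pvScatter
  rw [PySem.Dict.keys_foldl_modify_key m Prod.fst PySem.Dict.empty
    (fun _ p => (fun target => (m.map Prod.fst).foldl (fun target c2 =>
      target.modify c2 0 (fun v => v + PySem.Dict.getD (PySem.Dict.mk p.2) c2 0)) target)) d]
  rw [hs, pvUpdateSelf s _ hsub]

-- A's gather equals the class-indexed table of pvCell
theorem pvA_eq (m1 m2 : List (String × List (String × Int))) :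
    matrix_combine m1 m2 = (pvClasses m1 m2).map (fun c1 =>
      (c1, (pvClasses m1 m2).map (fun c2 => (c2, pvCell m1 m2 c1 c2)))) := by
  have hnd : (pvClasses m1 m2).Nodup := by
    unfold pvClasses; exact PySem.Set.nodup_union _ _ (PySem.Set.nodup_ofList _)
  show ((pvClasses m1 m2).foldl (fun d a => d.insert a
      ((pvClasses m1 m2).foldl (fun td c2 => td.insert c2 (pvCell m1 m2 a c2))
        PySem.Dict.empty).items) PySem.Dict.empty).items = _
  rw [pvFreshItems (pvClasses m1 m2)
    (fun a => ((pvClasses m1 m2).foldl (fun td c2 => td.insert c2 (pvCell m1 m2 a c2))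
      PySem.Dict.empty).items) hnd]
  apply List.map_congr_left
  intro c1 _
  rw [pvFreshItems (pvClasses m1 m2) (fun c2 => pvCell m1 m2 c1 c2) hnd]

-- B's scatter equals the same table
theorem pvB_eq (m1 m2 : List (String × List (String × Int)))
    (hnd1 : (m1.map Prod.fst).Nodup) (hnd2 : (m2.map Prod.fst).Nodup) :
    matrix_combine_alt m1 m2 = (pvClasses m1 m2).map (fun c1 =>
      (c1, (pvClasses m1 m2).map (fun c2 => (c2, pvCell m1 m2 c1 c2)))) := by
  have hnd : (pvClasses m1 m2).Nodup := by
    unfold pvClasses; exact PySem.Set.nodup_union _ _ (PySem.Set.nodup_ofList _)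
  have hsub1 : ∀ k ∈ m1.map Prod.fst, k ∈ pvClasses m1 m2 := by
    intro k hk
    unfold pvClasses
    exact (PySem.Set.mem_union _ _ _).mpr (Or.inl ((PySem.Set.mem_ofList _ _).mpr hk))
  have hsub2 : ∀ k ∈ m2.map Prod.fst, k ∈ pvClasses m1 m2 := by
    intro k hk
    unfold pvClasses
    exact (PySem.Set.mem_union _ _ _).mpr (Or.inr ((PySem.Set.mem_ofList _ _).mpr hk))
  -- names for the three stages
  set cls := pvClasses m1 m2 with hcls
  set zeroRow : PySem.Dict String Int :=
    cls.foldl (fun d c2 => d.insert c2 0) PySem.Dict.empty with hzr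
  set init : PySem.Dict String (PySem.Dict String Int) :=
    cls.foldl (fun r c1 => r.insert c1 zeroRow) PySem.Dict.empty with hinit
  set fin := pvScatter (pvScatter init m1) m2 with hfin
  have hinitKeys : init.keys = cls := pvFreshKeys cls (fun _ => zeroRow) hnd
  have hfinKeys : fin.keys = cls :=
    pvScatterKeys _ m2 cls (pvScatterKeys _ m1 cls hinitKeys hsub1) hsub2
  have hfinNodup : fin.keys.Nodup := by rw [hfinKeys]; exact hnd
  -- row getD of init
  have hinitRow : ∀ c1 ∈ cls, init.getD c1 PySem.Dict.empty = zeroRow := by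
    intro c1 hc1
    exact pvFreshGetD cls (fun _ => zeroRow) PySem.Dict.empty hnd c1 hc1
  have hzrKeys : zeroRow.keys = cls := pvFreshKeys cls (fun _ => (0 : Int)) hnd
  have hzrGetD : ∀ c2, zeroRow.getD c2 0 = 0 := by
    intro c2
    by_cases hc2 : c2 ∈ cls
    · exact pvFreshGetD cls (fun _ => (0 : Int)) 0 hnd c2 hc2
    · apply PySem.Dict.getD_of_not_contains
      rw [PySem.Dict.contains_eq_decide_mem_keys, hzrKeys]
      simpa using hc2
  -- the final dict, row by row
  show fin.items.map (fun p => (p.1, p.2.items)) = _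
  rw [PySem.Dict.items_eq_map_keys fin hfinNodup PySem.Dict.empty, hfinKeys, List.map_map]
  apply List.map_congr_left
  intro c1 hc1
  simp only [Function.comp]
  have hrowKeys : (fin.getD c1 PySem.Dict.empty).keys = cls := by
    rw [hfin]
    apply pvScatterRowKeys _ m2 hnd2 c1 cls _ hsub2
    apply pvScatterRowKeys _ m1 hnd1 c1 cls _ hsub1
    rw [hinitRow c1 hc1]; exact hzrKeys
  have hrowNodup : (fin.getD c1 PySem.Dict.empty).keys.Nodup := by rw [hrowKeys]; exact hnd
  rw [PySem.Dict.items_eq_map_keys (fin.getD c1 PySem.Dict.empty) hrowNodup 0, hrowKeys]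
  congr 1
  apply List.map_congr_left
  intro c2 _
  congr 1
  rw [hfin, pvScatterCell _ m2 hnd2 c1 c2, pvScatterCell _ m1 hnd1 c1 c2,
    hinitRow c1 hc1, hzrGetD c2]
  unfold pvCell
  ring

-- ===== VERDICT (by name: the statement is the Claim_ definition above) =====
theorem matrix_combine_spec : Claim_equal_matrix_combine := by
  intro m1 m2 _ hpre
  unfold Spec_matrix_combine
  rw [pvA_eq m1 m2, pvB_eq m1 m2 hpre.1 hpre.2.1]
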